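-- pv_equiv track=rewrite | github.com/sofazhg/classify | svm/feature_gen.py | feature_gen
-- ===== SOURCE A (Python) =====
-- def feature_gen(l_2mer, word):  #generate feature for word based on l_2mer
--     dict_feature = {}
--     for i in l_2mer:
--         dict_feature[i] = 0
--     for i in range(len(word)-1):
--         if word[i]+word[i+1] in l_2mer:
--             dict_feature[word[i]+word[i+1]] += 1
--     tuple_feature = (sorted(dict_feature.items(), key=lambda e: e[0], reverse=False))  #sort dict_feature according to keys
--     data_feature = []
--     for i in tuple_feature:
--         data_feature.append(i[1])
--     return data_feature
-- ===== SOURCE B (Python) =====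
-- def feature_gen(l_2mer, word):
--     return [sum(word[i:i + 2] == k for i in range(len(word) - 1))
--             for k in sorted(set(l_2mer))]
-- ===== Notes on version B (the rewrite author's own statement) =====
-- stated objective: simpler
-- what changed: B drops the dictionary machinery entirely: it sorts the distinct allowed 2-mers once and, for each key, counts matching length-2 slices of word directly, instead of A's preallocated zero dict, membership-guarded increment pass and items sort.
import Mathlib
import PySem

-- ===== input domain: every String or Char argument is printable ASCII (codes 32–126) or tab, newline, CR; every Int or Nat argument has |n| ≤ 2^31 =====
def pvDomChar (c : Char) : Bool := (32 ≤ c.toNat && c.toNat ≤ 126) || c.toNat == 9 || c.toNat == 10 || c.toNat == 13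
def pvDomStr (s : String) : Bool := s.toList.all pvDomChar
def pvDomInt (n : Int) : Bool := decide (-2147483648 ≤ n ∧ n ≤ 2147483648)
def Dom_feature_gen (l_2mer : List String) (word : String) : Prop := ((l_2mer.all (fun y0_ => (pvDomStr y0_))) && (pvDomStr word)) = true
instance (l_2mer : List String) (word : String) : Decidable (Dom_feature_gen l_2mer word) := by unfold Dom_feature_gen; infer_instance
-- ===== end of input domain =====

-- ===== PORT A =====
-- B discards A's dictionary machinery: it sorts the distinct allowed 2-mers once and counts
-- matching length-2 slices of word per key (return value proved equal; objective: simpler).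
def feature_gen (l_2mer : List String) (word : String) : List Int :=
  let dict0 : PySem.Dict String Int :=
    l_2mer.foldl (fun d i => d.insert i 0) PySem.Dict.empty
  let dict1 :=
    (PySem.List.pyRange 0 (PySem.Str.len word - 1)).foldl
      (fun d i =>
        if l_2mer.contains (String.ofList [PySem.List.pyGetD word.toList i ' ',
                                           PySem.List.pyGetD word.toList (i + 1) ' ']) then
          d.modify (String.ofList [PySem.List.pyGetD word.toList i ' ',
                                   PySem.List.pyGetD word.toList (i + 1) ' ']) 0 (· + 1)
        else d)
      dict0
  let tuple_feature := PySem.List.sorted dict1.items (fun e => e.1) false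
  tuple_feature.foldl (fun acc i => acc ++ [i.2]) []

-- ===== PORT B =====
def feature_gen_alt (l_2mer : List String) (word : String) : List Int :=
  (PySem.List.sorted (PySem.Set.ofList l_2mer) (fun k => k) false).map
    (fun k =>
      (PySem.List.pyRange 0 (PySem.Str.len word - 1)).foldl
        (fun acc i =>
          acc + (if PySem.Str.slice word (some i) (some (i + 2)) = k then 1 else 0))
        (0 : Int))

-- ===== PRECONDITION & SPEC =====
def Spec_feature_gen (l_2mer : List String) (word : String) (out : List Int) : Prop := out = feature_gen_alt l_2mer word
instance (l_2mer : List String) (word : String) (out : List Int) : Decidable (Spec_feature_gen l_2mer word out) := by unfold Spec_feature_gen; infer_instance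

-- ===== CLAIM (what is proved, stated in full; the proofs are below) =====
def Claim_equal_feature_gen : Prop := ∀ (l_2mer : List String) (word : String), Dom_feature_gen l_2mer word → Spec_feature_gen l_2mer word (feature_gen l_2mer word)

-- ===== LEMMAS AND PROOFS =====

-- the zero-initialisation loop: getD of the resulting dict
lemma zero_dict_getD (l : List String) (d : PySem.Dict String Int) (v : String) :
    (l.foldl (fun d k => d.insert k 0) d).getD v 0 = if v ∈ l then 0 else d.getD v 0 := by
  induction l generalizing d with
  | nil => simp
  | cons a t ih =>
    simp only [List.foldl_cons, ih, PySem.Dict.getD_insert, List.mem_cons]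
    by_cases hv : v ∈ t <;> by_cases ha : v = a <;> simp [hv, ha]

-- the index loop over range(len(word)-1) reads exactly the adjacent pairs of word
lemma foldl_bigrams {β : Type} (cs : List Char) (c0 : Char) (f : β → String → β) (init : β) :
    (PySem.List.pyRange 0 ((cs.length : Int) - 1)).foldl
      (fun acc i => f acc (String.ofList [PySem.List.pyGetD cs i c0, PySem.List.pyGetD cs (i + 1) c0])) init
    = (cs.zip cs.tail).foldl (fun acc p => f acc (String.ofList [p.1, p.2])) init := by
  rcases cs with _ | ⟨a, t⟩
  · simp
  · set P := (a :: t).zip t with hP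
    have hPlen : P.length = t.length := by simp [hP]
    have hlen : ((a :: t).length : Int) - 1 = PySem.List.len P := by
      simp [PySem.List.len, hPlen]
    rw [hlen, show (List.zip (a :: t) (a :: t).tail) = P from rfl]
    rw [← PySem.List.foldl_pyRange_zero_pyGetD P (c0, c0)
      (fun acc p => f acc (String.ofList [p.1, p.2])) init]
    apply PySem.List.foldl_congr_mem
    intro acc i hi
    have hb := PySem.List.mem_pyRange_one.1 hi
    have h0 : 0 ≤ i := hb.1
    have hiP : i < (P.length : Int) := by simpa [PySem.List.len] using hb.2
    have hiN : i.toNat < P.length := by omega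
    have hic : i < ((a :: t).length : Int) := by simp [hPlen] at hiN ⊢; omega
    have hic1 : i + 1 < ((a :: t).length : Int) := by simp [hPlen] at hiN ⊢; omega
    rw [PySem.List.pyGetD_eq_getElem P (c0, c0) h0 hiP,
        PySem.List.pyGetD_eq_getElem (a :: t) c0 h0 hic,
        PySem.List.pyGetD_eq_getElem (a :: t) c0 (by omega) hic1]
    have hit : i.toNat < t.length := hPlen ▸ hiN
    have hgz : P[i.toNat]'hiN = ((a :: t)[i.toNat]'(by omega), (a :: t).tail[i.toNat]'(by simpa using hit)) :=
      List.getElem_zip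
    have hn : (i + 1).toNat = i.toNat + 1 := by omega
    simp [hgz, hn]

-- a length-2 slice word[i:i+2] inside the range is the bigram at i
lemma slice_eq_bigram (cs : List Char) (i : Int) (h0 : 0 ≤ i) (h1 : i < (cs.length : Int) - 1) :
    PySem.List.slice cs (some i) (some (i + 2))
      = [PySem.List.pyGetD cs i ' ', PySem.List.pyGetD cs (i + 1) ' '] := by
  have h2 : 0 ≤ i + 2 := by omega
  rw [PySem.List.slice_toNat cs h0 h2]
  have hm : i.toNat + 1 < cs.length := by omega
  have hm0 : i.toNat < cs.length := by omega
  have hdrop : cs.drop i.toNat = cs[i.toNat] :: cs[i.toNat + 1] :: cs.drop (i.toNat + 2) := by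
    rw [List.drop_eq_getElem_cons hm0, List.drop_eq_getElem_cons (by omega)]
  have htn : (i + 2).toNat - i.toNat = 2 := by omega
  rw [htn,
      PySem.List.pyGetD_eq_getElem cs ' ' h0 (by omega),
      PySem.List.pyGetD_eq_getElem cs ' ' (by omega) (by omega)]
  have hti : (i + 1).toNat = i.toNat + 1 := by omega
  rw [hdrop]
  simp [hti]
  rw [hdrop]
  rfl

-- B's per-key inner loop counts the key among the bigrams of word
lemma per_key_count (cs : List Char) (k : String) :
    (PySem.List.pyRange 0 ((cs.length : Int) - 1)).foldl
      (fun acc i =>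
        acc + (if PySem.List.slice cs (some i) (some (i + 2)) = k.toList then 1 else 0))
      (0 : Int)
    = (((cs.zip cs.tail).map (fun p : Char × Char => String.ofList [p.1, p.2])).count k : Int) := by
  have hcong : (PySem.List.pyRange 0 ((cs.length : Int) - 1)).foldl
      (fun acc i =>
        acc + (if PySem.List.slice cs (some i) (some (i + 2)) = k.toList then 1 else 0))
      (0 : Int)
    = (PySem.List.pyRange 0 ((cs.length : Int) - 1)).foldl
      (fun acc i =>
        acc + (if String.ofList [PySem.List.pyGetD cs i ' ', PySem.List.pyGetD cs (i + 1) ' '] = k then 1 else 0))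
      (0 : Int) := by
    apply PySem.List.foldl_congr_mem
    intro acc i hi
    have hb := PySem.List.mem_pyRange_one.1 hi
    rw [slice_eq_bigram cs i hb.1 (by simpa using hb.2)]
    congr 1
    have : (String.ofList [PySem.List.pyGetD cs i ' ', PySem.List.pyGetD cs (i + 1) ' '] = k)
        ↔ ([PySem.List.pyGetD cs i ' ', PySem.List.pyGetD cs (i + 1) ' '] = k.toList) := by
      constructor
      · intro h; rw [← h]; simp
      · intro h; rw [h]; exact String.ofList_toList
    simp [this]
  rw [hcong,
      foldl_bigrams cs ' '
        (fun (acc : Int) s => acc + (if s = k then 1 else 0)) 0,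
      ← List.foldl_map (f := fun p : Char × Char => String.ofList [p.1, p.2])
        (g := fun (acc : Int) s => acc + (if s = k then 1 else 0))]
  set bgs := (cs.zip cs.tail).map (fun p : Char × Char => String.ofList [p.1, p.2]) with hbgs
  have : bgs.foldl (fun acc s => acc + (if s = k then 1 else 0)) (0 : Int)
      = bgs.foldl (fun acc s => if s == k then acc + 1 else acc) (0 : Int) := by
    apply PySem.List.foldl_congr_mem
    intro acc s _
    by_cases h : s = k <;> simp [h]
  rw [this, PySem.List.foldl_beq_add_one]
  simp

-- Set.update adds nothing when every element is already present
lemma set_update_of_subset (F S : List String) (h : ∀ x ∈ F, x ∈ S) :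
    PySem.Set.update S F = S := by
  induction F generalizing S with
  | nil => rfl
  | cons a t ih =>
    have ha : PySem.Set.add S a = S := by
      simp [PySem.Set.add, PySem.Set.contains, h a (by simp)]
    show List.foldl PySem.Set.add (PySem.Set.add S a) t = S
    rw [ha]; exact ih S (fun x hx => h x (by simp [hx]))

-- the A-side sort of (key, value) pairs is the B-side sort of the keys, paired up afterwards
lemma sorted_pairs_eq_map_sorted (S : List String) (hS : S.Nodup) (g : String → Int) :
    PySem.List.sorted (S.map (fun k => (k, g k))) (fun e => e.1) false
      = (PySem.List.sorted S (fun k => k) false).map (fun k => (k, g k)) := by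
  apply PySem.List.sorted_eq_of_perm_of_pairwise_lt
  · exact ((PySem.List.sorted_perm S (fun k => k) false).map _)
  · rw [List.pairwise_map]
    have h1 := PySem.List.sorted_pairwise S (fun k => k)
    have h2 : (PySem.List.sorted S (fun k => k) false).Nodup :=
      (PySem.List.sorted_perm S (fun k => k) false).nodup_iff.2 hS
    exact (h1.and h2).imp (fun h => lt_of_le_of_ne h.1 h.2)

-- ===== VERDICT (by name: the statement is the Claim_ definition above) =====
theorem feature_gen_spec : Claim_equal_feature_gen := by
  intro l_2mer word _
  unfold Spec_feature_gen
  simp only [feature_gen, feature_gen_alt, PySem.Str.len_eq]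
  rw [foldl_bigrams word.toList ' '
      (fun (d : PySem.Dict String Int) bg => if l_2mer.contains bg then d.modify bg 0 (· + 1) else d)]
  rw [← List.foldl_map (f := fun p : Char × Char => String.ofList [p.1, p.2])
      (g := fun (d : PySem.Dict String Int) bg =>
              if l_2mer.contains bg then d.modify bg 0 (· + 1) else d)]
  rw [PySem.List.foldl_if_eq_foldl_filter (fun bg => l_2mer.contains bg)
      (fun (d : PySem.Dict String Int) bg => d.modify bg 0 (· + 1))]
  set bgs := (word.toList.zip word.toList.tail).map (fun p : Char × Char => String.ofList [p.1, p.2]) with hbgs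
  set F := bgs.filter (fun bg => l_2mer.contains bg) with hF
  set d0 := l_2mer.foldl (fun d i => d.insert i 0) (PySem.Dict.empty : PySem.Dict String Int) with hd0
  set dict1 := F.foldl (fun d bg => d.modify bg 0 (· + 1)) d0 with hdict1
  have hupdate : PySem.Set.update ([] : PySem.Set String) l_2mer = PySem.Set.ofList l_2mer := by
    rw [PySem.Set.ofList_eq_foldl]; rfl
  have hkeys0 : d0.keys = PySem.Set.ofList l_2mer := by
    rw [hd0, PySem.Dict.keys_foldl_insert l_2mer (fun _ _ => 0), PySem.Dict.keys_empty, hupdate]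
  have hkeys1 : dict1.keys = PySem.Set.ofList l_2mer := by
    rw [hdict1, PySem.Dict.keys_foldl_modify F 0 (fun _ _ => (· + 1)), hkeys0]
    refine set_update_of_subset _ _ (fun x hx => ?_)
    have := (List.mem_filter.1 (hF ▸ hx)).2
    exact (PySem.Set.mem_ofList _ _).2 (by simpa using this)
  have hnodup : dict1.keys.Nodup := hkeys1 ▸ PySem.Set.nodup_ofList l_2mer
  rw [PySem.List.foldl_append_singleton_eq_map (fun i : String × Int => i.2), List.nil_append]
  rw [PySem.Dict.items_eq_map_keys dict1 hnodup 0, hkeys1]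
  have hval : ∀ k ∈ PySem.Set.ofList l_2mer,
      (fun k => (k, dict1.getD k 0)) k = (fun k => (k, (List.count k bgs : Int))) k := by
    intro k hk
    have hkmem : k ∈ l_2mer := (PySem.Set.mem_ofList _ _).1 hk
    have hcf : List.count k F = List.count k bgs := by
      rw [hF]; exact List.count_filter (by simpa using hkmem)
    have h0 : d0.getD k 0 = 0 := by rw [hd0, zero_dict_getD, if_pos hkmem]
    simp only [hdict1, PySem.Dict.getD_foldl_modify_add_one, h0, hcf, zero_add]
  rw [List.map_congr_left hval]
  rw [sorted_pairs_eq_map_sorted _ (PySem.Set.nodup_ofList l_2mer)]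
  rw [List.map_map]
  apply List.map_congr_left
  intro k _
  have hsl : ∀ i : Int, PySem.Str.slice word (some i) (some (i + 2)) = k
      ↔ PySem.List.slice word.toList (some i) (some (i + 2)) = k.toList := by
    intro i
    constructor
    · intro h; rw [← h]; simp [PySem.Str.toList_slice]
    · intro h
      have h2 := congrArg String.ofList h
      rw [← PySem.Chars.slice_eq_listSlice, ← PySem.Str.toList_slice] at h2
      simpa using h2
  have : (PySem.List.pyRange 0 ((word.toList.length : Int) - 1)).foldl
      (fun acc i =>
        acc + (if PySem.Str.slice word (some i) (some (i + 2)) = k then 1 else 0)) (0 : Int)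
    = (PySem.List.pyRange 0 ((word.toList.length : Int) - 1)).foldl
      (fun acc i =>
        acc + (if PySem.List.slice word.toList (some i) (some (i + 2)) = k.toList then 1 else 0)) (0 : Int) := by
    apply PySem.List.foldl_congr_mem
    intro acc i _
    simp [hsl i]
  simp only [Function.comp_apply, this, per_key_count word.toList k, hbgs]
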